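-- pv_equiv track=rewrite | github.com/JennyZ99/LeetCode | tag:hashtable or set/easy/748. Shortest Completing Word/solution.py | is_completing
-- ===== SOURCE A (Python) =====
-- def is_completing(word: str, dic_lp: dict) -> bool:
--     dic_this = {}
--     for val in word:
--         if val not in dic_this:
--             dic_this[val]=1
--         else:
--             dic_this[val]=dic_this[val]+1
--
--     for key,val in dic_lp.items():
--         if key not in dic_this: return False
--         elif val < dic_this[key]: return False
--     return True
-- ===== SOURCE B (Python) =====
-- def is_completing(word: str, dic_lp: dict) -> bool:
--     # Consume the requirements: one pass over word decrements each required key it hits.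
--     rem = dict(dic_lp)
--     for ch in word:
--         if ch in rem:
--             rem[ch] = rem[ch] - 1
--     # key k with requirement v passes iff its remainder v - count landed in [0, v):
--     # remainder >= 0 means count <= v, remainder < v means count >= 1.
--     return all(0 <= rem[key] < val for key, val in dic_lp.items())
-- ===== Notes on version B (the rewrite author's own statement) =====
-- stated objective: alternative
-- what changed: B inverts A's dataflow: instead of building a frequency table of word and comparing it against the requirements, B copies the requirement dict, decrements entries in a single consuming pass over word, and then checks every remainder lies in [0, val) (remainder >= 0 means count <= val, remainder < val means at least one hit).
import Mathlib
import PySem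

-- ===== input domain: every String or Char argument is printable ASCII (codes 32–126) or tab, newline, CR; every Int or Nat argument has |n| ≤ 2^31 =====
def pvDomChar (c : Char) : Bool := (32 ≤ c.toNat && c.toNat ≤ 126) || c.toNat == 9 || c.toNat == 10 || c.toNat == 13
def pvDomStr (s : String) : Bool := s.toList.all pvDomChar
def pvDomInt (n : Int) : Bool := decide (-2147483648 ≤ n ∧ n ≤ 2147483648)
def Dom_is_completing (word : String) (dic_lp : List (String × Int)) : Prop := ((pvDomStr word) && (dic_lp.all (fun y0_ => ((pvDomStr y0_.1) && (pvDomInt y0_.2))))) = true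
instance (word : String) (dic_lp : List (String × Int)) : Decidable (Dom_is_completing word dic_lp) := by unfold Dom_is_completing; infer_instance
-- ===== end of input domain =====

-- B replaces A's word-frequency table by a consuming pass: it decrements the requirement dict while scanning word, then interval-checks the remainders (alternative decomposition, similar cost).


-- ===== PORT A =====
-- first loop: build dic_this; Python's chars are length-1 strings (String.singleton)
def pvABuild (w : List Char) : PySem.Dict String Int :=
  w.foldl (fun d v =>
    if d.contains (String.singleton v) = false then d.insert (String.singleton v) 1
    else d.insert (String.singleton v) (d.getD (String.singleton v) 0 + 1)) PySem.Dict.empty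

-- second loop with early returns
def pvACheck (dic_this : PySem.Dict String Int) : List (String × Int) → Bool
  | [] => true
  | (key, val) :: rest =>
      if dic_this.contains key = false then false
      else if val < dic_this.getD key 0 then false
      else pvACheck dic_this rest

def is_completing (word : String) (dic_lp : List (String × Int)) : Bool :=
  pvACheck (pvABuild word.toList) (PySem.Dict.ofList dic_lp).items

-- ===== PORT B =====
-- the consuming pass: for ch in word: if ch in rem: rem[ch] = rem[ch] - 1
def pvBConsume (w : List Char) (rem : PySem.Dict String Int) : PySem.Dict String Int :=
  w.foldl (fun d ch =>
    if d.contains (String.singleton ch) then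
      d.insert (String.singleton ch) (d.getD (String.singleton ch) 0 - 1)
    else d) rem

-- all(0 <= rem[key] < val for key, val in dic_lp.items())
def is_completing_alt (word : String) (dic_lp : List (String × Int)) : Bool :=
  let rem := pvBConsume word.toList (PySem.Dict.ofList dic_lp)
  (PySem.Dict.ofList dic_lp).items.all
    (fun p => decide (0 ≤ rem.getD p.1 0 ∧ rem.getD p.1 0 < p.2))

-- ===== PRECONDITION & SPEC =====
def Spec_is_completing (word : String) (dic_lp : List (String × Int)) (out : Bool) : Prop := out = is_completing_alt word dic_lp
instance (word : String) (dic_lp : List (String × Int)) (out : Bool) : Decidable (Spec_is_completing word dic_lp out) := by unfold Spec_is_completing; infer_instance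

-- ===== CLAIM (what is proved, stated in full; the proofs are below) =====
def Claim_equal_is_completing : Prop := ∀ (word : String) (dic_lp : List (String × Int)), Dom_is_completing word dic_lp → Spec_is_completing word dic_lp (is_completing word dic_lp)

-- ===== LEMMAS AND PROOFS =====

-- A's first loop is Counter(word) keyed by singleton strings
theorem pvABuild_eq_counter (w : List Char) :
    pvABuild w = PySem.Dict.counter (w.map String.singleton) := by
  have hstep : ∀ (d : PySem.Dict String Int) (v : Char),
      (if d.contains (String.singleton v) = false then d.insert (String.singleton v) 1
       else d.insert (String.singleton v) (d.getD (String.singleton v) 0 + 1))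
      = d.insert (String.singleton v) (d.getD (String.singleton v) 0 + 1) := by
    intro d v
    by_cases h : d.contains (String.singleton v) = false
    · simp [h, PySem.Dict.getD_of_not_contains d 0 h]
    · simp [h]
  calc pvABuild w
      = w.foldl (fun d v => d.insert (String.singleton v) (d.getD (String.singleton v) 0 + 1)) PySem.Dict.empty := by
        unfold pvABuild; congr 1; funext d v; exact hstep d v
    _ = (w.map String.singleton).foldl (fun d x => d.insert x (d.getD x 0 + 1)) PySem.Dict.empty := by
        rw [List.foldl_map]
    _ = PySem.Dict.counter (w.map String.singleton) :=
        PySem.Dict.foldl_insert_getD_add_one_eq_counter _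

def pvCnt (w : List Char) (k : String) : Int :=
  ((w.map String.singleton).count k : Int)

-- remaining value = initial value minus the hits of that key in word (for present keys)
theorem pvCnt_cons (ch : Char) (w : List Char) (k : String) :
    pvCnt (ch :: w) k = (if String.singleton ch = k then 1 else 0) + pvCnt w k := by
  unfold pvCnt
  simp only [List.map_cons, List.count_cons]
  by_cases h : String.singleton ch = k
  · simp only [h, BEq.rfl, if_true]
    push_cast; ring
  · have hne : (String.singleton ch == k) = false := by simpa using h
    simp [h, hne]

theorem pvBConsume_getD (w : List Char) (r : PySem.Dict String Int) (k : String) :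
    (pvBConsume w r).getD k 0
      = r.getD k 0 - (if r.contains k then pvCnt w k else 0) := by
  induction w generalizing r with
  | nil => simp [pvBConsume, pvCnt]
  | cons ch w ih =>
    show (pvBConsume w _).getD k 0 = _
    rw [pvCnt_cons]
    by_cases h : r.contains (String.singleton ch) = true
    · simp only [h, if_pos]
      rw [ih, PySem.Dict.contains_insert, PySem.Dict.getD_insert]
      by_cases hk : k = String.singleton ch
      · subst hk
        simp only [BEq.rfl, Bool.true_or, if_pos, h]
        ring
      · have hk' : (k == String.singleton ch) = false := by simpa using hk
        simp only [hk', Bool.false_or, if_neg hk]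
        by_cases hc : r.contains k = true
        · have hne : ¬ String.singleton ch = k := fun he => hk he.symm
          simp [hc, hne]
        · simp [hc]
    · simp only [h]
      rw [ih]
      by_cases hc : r.contains k = true
      · have hne : ¬ String.singleton ch = k := by
          intro he; rw [he] at h; exact h hc
        simp [hc, hne]
      · simp [hc]

-- A's early-return second loop as an `all`
theorem pvACheck_eq_all (dic : PySem.Dict String Int) (items : List (String × Int)) :
    pvACheck dic items
      = items.all (fun p => dic.contains p.1 && !(decide (p.2 < dic.getD p.1 0))) := by
  induction items with
  | nil => rfl
  | cons p rest ih =>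
    obtain ⟨key, val⟩ := p
    rw [pvACheck]
    by_cases h : dic.contains key = false
    · simp [h]
    · by_cases hv : val < dic.getD key 0
      · simp [h, hv]
      · have h' : dic.contains key = true := by
          cases hcb : dic.contains key
          · exact absurd hcb h
          · rfl
        simp [h', hv, ih]

theorem pv_all_congr {α : Type} (l : List α) (p q : α → Bool)
    (h : ∀ x ∈ l, p x = q x) : l.all p = l.all q := by
  induction l with
  | nil => rfl
  | cons a t ih =>
    simp only [List.all_cons, h a (by simp), ih (fun x hx => h x (by simp [hx]))]

-- the per-key predicates of the two programs agree: b says "at least one hit", n is the hit count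
theorem pv_pred_eq (n v : Int) (b : Bool) (hb : b = true ↔ 1 ≤ n) :
    (b && !decide (v < n)) = decide (0 ≤ v - n ∧ v - n < v) := by
  cases b
  · have h1 : ¬ 1 ≤ n := by
      intro h
      exact absurd (hb.mpr h) (by simp)
    simp only [Bool.false_and]
    symm; rw [decide_eq_false_iff_not]
    rintro ⟨h0, hlt⟩; omega
  · have h1 : 1 ≤ n := hb.mp rfl
    simp only [Bool.true_and]
    by_cases hv : v < n
    · simp only [hv, decide_true, Bool.not_true]
      symm; rw [decide_eq_false_iff_not]
      rintro ⟨h0, _⟩; omega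
    · simp only [hv, decide_false, Bool.not_false]
      symm; rw [decide_eq_true_eq]
      exact ⟨by omega, by omega⟩

-- ===== VERDICT (by name: the statement is the Claim_ definition above) =====
theorem is_completing_spec : Claim_equal_is_completing := by
  intro word dic_lp _
  unfold Spec_is_completing is_completing is_completing_alt
  set d := PySem.Dict.ofList dic_lp with hd
  set w := word.toList
  rw [pvACheck_eq_all]
  dsimp only
  apply pv_all_congr
  rintro ⟨k, v⟩ hmem
  have hnd : d.keys.Nodup := PySem.Dict.nodup_keys_ofList dic_lp
  have hget : d.getD k 0 = v := PySem.Dict.getD_of_mem_items d hmem hnd 0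
  have hcon : d.contains k = true := by
    rw [PySem.Dict.contains_iff_mem_keys]
    exact PySem.Dict.mem_keys_of_mem_items d hmem
  rw [pvABuild_eq_counter, PySem.Dict.contains_counter, PySem.Dict.getD_counter]
  rw [pvBConsume_getD, hcon, if_pos rfl, hget]
  have hb : (w.map String.singleton).contains k = true
      ↔ 1 ≤ ((w.map String.singleton).count k : Int) := by
    rw [List.contains_iff_mem, ← List.count_pos_iff]
    omega
  simp only [pvCnt]
  exact pv_pred_eq _ v _ hb
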